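-- pv_equiv track=rewrite | github.com/Aiman-Batool786/Project_pipeline | scraper.py | _parse_seller_block
-- ===== SOURCE A (Python) =====
-- def _s(v) -> str:
--     if v is None:
--         return ''
--     s = str(v).strip()
--     return '' if s in ('None', 'null', '0', 'false', 'undefined') else s
--
-- def _parse_seller_block(store: dict) -> dict:
--     if not store or not isinstance(store, dict):
--         return {}
--     sid = _s(
--         store.get('storeNum') or store.get('sellerId') or
--         store.get('storeId') or store.get('shopId') or
--         store.get('userId') or store.get('memberId')
--     )
--     result = {
--         'store_name':            _s(store.get('storeName') or store.get('sellerName') or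
--                                     store.get('shopName') or store.get('name')),
--         'store_id':              sid,
--         'seller_id':             _s(store.get('sellerId') or store.get('userId') or
--                                     store.get('memberId')),
--         'store_url':             _s(store.get('storeUrl') or store.get('shopUrl') or
--                                     (f"https://www.aliexpress.com/store/{sid}" if sid else '')),
--         'seller_country':        _s(store.get('country') or store.get('countryCompleteName') or
--                                     store.get('shopCountry')),
--         'seller_rating':         _s(store.get('positiveRate') or store.get('itemAs') or
--                                     store.get('sellerRating')),
--         'seller_positive_rate':  _s(store.get('positiveRate') or
--                                     store.get('positiveFeedbackRate')),
--         'seller_communication':  _s(store.get('communicationRating') or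
--                                     store.get('serviceAs') or store.get('communicationScore')),
--         'seller_shipping_speed': _s(store.get('shippingRating') or store.get('shippingAs') or
--                                     store.get('shippingScore')),
--         'store_open_date':       _s(store.get('openTime') or store.get('openDate') or
--                                     store.get('establishedDate')),
--         'seller_level':          _s(store.get('sellerLevel') or store.get('shopLevel') or
--                                     store.get('level')),
--         'seller_total_reviews':  _s(store.get('totalEvaluationNum') or store.get('reviewNum') or
--                                     store.get('feedbackCount')),
--         'seller_positive_num':   _s(store.get('positiveNum') or
--                                     store.get('positiveFeedbackNum')),
--         'is_top_rated':          _s(store.get('isTopRatedSeller') or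
--                                     store.get('topRatedSeller')),
--     }
--     return {k: v for k, v in result.items() if v}
-- ===== SOURCE B (Python) =====
-- def _s(v) -> str:
--     if v is None:
--         return ''
--     s = str(v).strip()
--     return '' if s in ('None', 'null', '0', 'false', 'undefined') else s
--
-- _ID_KEYS = ['storeNum', 'sellerId', 'storeId', 'shopId', 'userId', 'memberId']
--
-- # field -> ordered candidate source keys ('store_id' is computed: it reuses sid)
-- _FIELD_SPEC = [
--     ('store_name',            ['storeName', 'sellerName', 'shopName', 'name']),
--     ('store_id',              []),
--     ('seller_id',             ['sellerId', 'userId', 'memberId']),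
--     ('store_url',             ['storeUrl', 'shopUrl']),
--     ('seller_country',        ['country', 'countryCompleteName', 'shopCountry']),
--     ('seller_rating',         ['positiveRate', 'itemAs', 'sellerRating']),
--     ('seller_positive_rate',  ['positiveRate', 'positiveFeedbackRate']),
--     ('seller_communication',  ['communicationRating', 'serviceAs', 'communicationScore']),
--     ('seller_shipping_speed', ['shippingRating', 'shippingAs', 'shippingScore']),
--     ('store_open_date',       ['openTime', 'openDate', 'establishedDate']),
--     ('seller_level',          ['sellerLevel', 'shopLevel', 'level']),
--     ('seller_total_reviews',  ['totalEvaluationNum', 'reviewNum', 'feedbackCount']),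
--     ('seller_positive_num',   ['positiveNum', 'positiveFeedbackNum']),
--     ('is_top_rated',          ['isTopRatedSeller', 'topRatedSeller']),
-- ]
--
--
-- def _best(store, keys):
--     # Inverted lookup: instead of probing each candidate key in the store, scan the
--     # store's items once, collect (priority, value) for every truthy entry whose key
--     # is a candidate, and keep the minimum-priority one.
--     cands = [(keys.index(k), v) for k, v in store.items() if v and k in keys]
--     if not cands:
--         return ''
--     return min(cands, key=lambda p: p[0])[1]
--
--
-- def _field_val(store, sid, field, keys):
--     if field == 'store_id':
--         return sid
--     raw = _best(store, keys)
--     if not raw and field == 'store_url' and sid: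
--         raw = f"https://www.aliexpress.com/store/{sid}"
--     return _s(raw)
--
--
-- def _parse_seller_block(store: dict) -> dict:
--     if not store or not isinstance(store, dict):
--         return {}
--     sid = _s(_best(store, _ID_KEYS))
--     out = {}
--     for field, keys in _FIELD_SPEC:
--         val = _field_val(store, sid, field, keys)
--         if val:
--             out[field] = val
--     return out
-- ===== Notes on version B (the rewrite author's own statement) =====
-- stated objective: alternative
-- what changed: Inverts the lookup direction: instead of A's per-field or-chains of store.get probes, B scans the store's items once per field, collecting (priority, value) pairs for truthy entries whose key is a candidate and taking the minimum-priority one, driven by a field-to-candidate-keys table folded into the output with filter-as-you-build.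
import Mathlib
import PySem

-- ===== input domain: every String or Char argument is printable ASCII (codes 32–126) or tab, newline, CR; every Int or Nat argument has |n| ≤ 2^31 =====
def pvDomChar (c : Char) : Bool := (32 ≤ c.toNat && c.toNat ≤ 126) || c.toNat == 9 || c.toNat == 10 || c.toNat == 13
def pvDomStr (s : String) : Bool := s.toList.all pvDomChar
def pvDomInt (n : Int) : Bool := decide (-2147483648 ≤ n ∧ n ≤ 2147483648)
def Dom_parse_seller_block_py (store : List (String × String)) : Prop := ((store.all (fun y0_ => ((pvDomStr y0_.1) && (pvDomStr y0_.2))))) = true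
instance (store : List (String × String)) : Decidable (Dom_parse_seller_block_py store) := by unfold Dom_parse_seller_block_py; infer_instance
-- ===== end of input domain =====

-- B inverts the lookup direction: instead of A's per-field or-chains of store.get probes, it
-- scans the store's items per field, collecting (priority, value) candidates and taking the
-- minimum-priority one (objective: alternative). Equivalence is on the return value.

-- ===== PORT A =====
-- _s: strip, then map sentinel strings to ''
def pvS (v : String) : String :=
  let s := PySem.Str.strip v
  if s = "None" ∨ s = "null" ∨ s = "0" ∨ s = "false" ∨ s = "undefined" then "" else s

-- store.get(k): none (→ falsy, modeled "") or the string value; first match on the assoc list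
def pvGetD (store : List (String × String)) (k : String) : String :=
  ((PySem.Dict.mk store).get? k).getD ""

-- Python `a or b` on the (string-or-None→"") values
def pvOr (a b : String) : String := if a = "" then b else a

def parse_seller_block_py (store : List (String × String)) : List (String × String) :=
  if store = [] then []
  else
    let g := pvGetD store
    let sid := pvS (pvOr (pvOr (pvOr (pvOr (pvOr (g "storeNum") (g "sellerId")) (g "storeId")) (g "shopId")) (g "userId")) (g "memberId"))
    let result : List (String × String) := [
      ("store_name", pvS (pvOr (pvOr (pvOr (g "storeName") (g "sellerName")) (g "shopName")) (g "name"))),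
      ("store_id", sid),
      ("seller_id", pvS (pvOr (pvOr (g "sellerId") (g "userId")) (g "memberId"))),
      ("store_url", pvS (pvOr (pvOr (g "storeUrl") (g "shopUrl")) (if sid ≠ "" then "https://www.aliexpress.com/store/" ++ sid else ""))),
      ("seller_country", pvS (pvOr (pvOr (g "country") (g "countryCompleteName")) (g "shopCountry"))),
      ("seller_rating", pvS (pvOr (pvOr (g "positiveRate") (g "itemAs")) (g "sellerRating"))),
      ("seller_positive_rate", pvS (pvOr (g "positiveRate") (g "positiveFeedbackRate"))),
      ("seller_communication", pvS (pvOr (pvOr (g "communicationRating") (g "serviceAs")) (g "communicationScore"))),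
      ("seller_shipping_speed", pvS (pvOr (pvOr (g "shippingRating") (g "shippingAs")) (g "shippingScore"))),
      ("store_open_date", pvS (pvOr (pvOr (g "openTime") (g "openDate")) (g "establishedDate"))),
      ("seller_level", pvS (pvOr (pvOr (g "sellerLevel") (g "shopLevel")) (g "level"))),
      ("seller_total_reviews", pvS (pvOr (pvOr (g "totalEvaluationNum") (g "reviewNum")) (g "feedbackCount"))),
      ("seller_positive_num", pvS (pvOr (g "positiveNum") (g "positiveFeedbackNum"))),
      ("is_top_rated", pvS (pvOr (g "isTopRatedSeller") (g "topRatedSeller")))]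
    result.filter (fun kv => kv.2 != "")

-- ===== PORT B =====
def pvIdKeys : List String :=
  ["storeNum", "sellerId", "storeId", "shopId", "userId", "memberId"]

def pvFieldSpec : List (String × List String) := [
  ("store_name",            ["storeName", "sellerName", "shopName", "name"]),
  ("store_id",              []),
  ("seller_id",             ["sellerId", "userId", "memberId"]),
  ("store_url",             ["storeUrl", "shopUrl"]),
  ("seller_country",        ["country", "countryCompleteName", "shopCountry"]),
  ("seller_rating",         ["positiveRate", "itemAs", "sellerRating"]),
  ("seller_positive_rate",  ["positiveRate", "positiveFeedbackRate"]),
  ("seller_communication",  ["communicationRating", "serviceAs", "communicationScore"]),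
  ("seller_shipping_speed", ["shippingRating", "shippingAs", "shippingScore"]),
  ("store_open_date",       ["openTime", "openDate", "establishedDate"]),
  ("seller_level",          ["sellerLevel", "shopLevel", "level"]),
  ("seller_total_reviews",  ["totalEvaluationNum", "reviewNum", "feedbackCount"]),
  ("seller_positive_num",   ["positiveNum", "positiveFeedbackNum"]),
  ("is_top_rated",          ["isTopRatedSeller", "topRatedSeller"])]

-- store.items(): under the assoc-list-as-dict convention (lookup = first match) the dict's
-- items are the first occurrence of each key, in order; exact for Python's dict iteration.
def pvItemsGo : List (String × String) → List String → List (String × String)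
  | [], _ => []
  | kv :: rest, seen =>
    if seen.contains kv.1 then pvItemsGo rest seen
    else kv :: pvItemsGo rest (kv.1 :: seen)

def pvItems (store : List (String × String)) : List (String × String) := pvItemsGo store []

-- the comprehension [(keys.index(k), v) for k, v in store.items() if v and k in keys]
-- (`k in keys` and `keys.index(k)` are together exactly `index? keys k` being some)
def pvCands (items : List (String × String)) (ks : List String) : List (Nat × String) :=
  items.filterMap (fun kv =>
    if kv.2 ≠ "" then (PySem.List.index? ks kv.1).map (fun i => (i, kv.2)) else none)

-- _best: min(cands, key=lambda p: p[0])[1] if cands else ''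
def pvBest (store : List (String × String)) (ks : List String) : String :=
  match PySem.List.min? (pvCands (pvItems store) ks) (fun p => p.1) with
  | some p => p.2
  | none => ""

-- _field_val
def pvFieldVal (store : List (String × String)) (sid : String) (fk : String × List String) : String :=
  if fk.1 = "store_id" then sid
  else
    let raw := pvBest store fk.2
    let raw2 := if raw = "" ∧ fk.1 = "store_url" ∧ sid ≠ "" then "https://www.aliexpress.com/store/" ++ sid else raw
    pvS raw2

def parse_seller_block_py_alt (store : List (String × String)) : List (String × String) :=
  if store = [] then []
  else
    let sid := pvS (pvBest store pvIdKeys)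
    pvFieldSpec.foldl
      (fun out fk =>
        let val := pvFieldVal store sid fk
        if val ≠ "" then out ++ [(fk.1, val)] else out) []

-- ===== PRECONDITION & SPEC =====
def Spec_parse_seller_block_py (store : List (String × String)) (out : List (String × String)) : Prop := out = parse_seller_block_py_alt store
instance (store : List (String × String)) (out : List (String × String)) : Decidable (Spec_parse_seller_block_py store out) := by unfold Spec_parse_seller_block_py; infer_instance

-- ===== CLAIM (what is proved, stated in full; the proofs are below) =====
def Claim_equal_parse_seller_block_py : Prop := ∀ (store : List (String × String)), Dom_parse_seller_block_py store → Spec_parse_seller_block_py store (parse_seller_block_py store)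

-- ===== LEMMAS AND PROOFS =====
theorem pvOr_empty_right (a : String) : pvOr a "" = a := by
  unfold pvOr; split <;> simp_all

theorem pvOr_assoc (a b c : String) : pvOr (pvOr a b) c = pvOr a (pvOr b c) := by
  unfold pvOr; by_cases h : a = "" <;> simp [h]

theorem pvUrl_raw (r sid url : String) :
    (if r = "" ∧ sid ≠ "" then url else r) = pvOr r (if sid ≠ "" then url else "") := by
  unfold pvOr
  by_cases hr : r = "" <;> by_cases hs : sid = "" <;> simp [hr, hs]

theorem foldl_put (V : String × List String → String) (l : List (String × List String))
    (acc : List (String × String)) :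
    l.foldl (fun out fk => let val := V fk; if val ≠ "" then out ++ [(fk.1, val)] else out) acc
      = acc ++ (l.map (fun fk => (fk.1, V fk))).filter (fun kv => kv.2 != "") := by
  induction l generalizing acc with
  | nil => simp
  | cons fk rest ih =>
    rw [List.foldl_cons, ih]
    by_cases h : V fk = "" <;> simp [h]

-- no produced item has a key in `seen`
theorem pvItemsGo_fresh (l : List (String × String)) :
    ∀ (seen : List String) (x : String × String), x ∈ pvItemsGo l seen → seen.contains x.1 = false := by
  induction l with
  | nil => intro seen x hx; simp [pvItemsGo] at hx
  | cons kv rest ih =>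
    intro seen x hx
    by_cases hc : seen.contains kv.1
    · simp only [pvItemsGo, if_pos hc] at hx
      exact ih _ _ hx
    · simp only [pvItemsGo, if_neg hc] at hx
      rcases List.mem_cons.mp hx with h | h
      · rw [h]; simpa using hc
      · have := ih _ _ h
        simp only [List.contains_cons, Bool.or_eq_false_iff] at this
        exact this.2

-- the keys of the items list are distinct
theorem pvItemsGo_nodup_keys (l : List (String × String)) :
    ∀ (seen : List String), ((pvItemsGo l seen).map (fun kv => kv.1)).Nodup := by
  induction l with
  | nil => intro seen; simp [pvItemsGo]
  | cons kv rest ih =>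
    intro seen
    by_cases hc : seen.contains kv.1
    · simp only [pvItemsGo, if_pos hc]
      exact ih _
    · simp only [pvItemsGo, if_neg hc, List.map_cons, List.nodup_cons]
      refine ⟨?_, ih _⟩
      intro hmem
      rcases List.mem_map.mp hmem with ⟨p, hp, hpk⟩
      have := pvItemsGo_fresh rest (kv.1 :: seen) p hp
      simp [hpk] at this

theorem pvItems_nodup_keys (store : List (String × String)) :
    ((pvItems store).map (fun kv => kv.1)).Nodup :=
  pvItemsGo_nodup_keys store []

-- first-match lookup on the items list agrees with the dict's get?
theorem find?_pvItemsGo (l : List (String × String)) :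
    ∀ (seen : List String) (k : String), seen.contains k = false →
      ((pvItemsGo l seen).find? (fun kv => kv.1 == k)).map (fun kv => kv.2)
        = (PySem.Dict.mk l).get? k := by
  induction l with
  | nil => intro seen k _; simp [pvItemsGo, PySem.Dict.get?]
  | cons kv rest ih =>
    obtain ⟨k1, v1⟩ := kv
    intro seen k hk
    by_cases hc : seen.contains k1
    · have hne : (k1 == k) = false := by
        cases hbe : k1 == k
        · rfl
        · have he : k1 = k := by simpa using hbe
          rw [he] at hc
          rw [hk] at hc
          exact absurd hc (by simp)
      simp only [pvItemsGo, if_pos hc]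
      rw [PySem.Dict.get?_mk_cons]
      simp only [hne, Bool.false_eq_true, if_false]
      exact ih _ _ hk
    · simp only [pvItemsGo, if_neg hc, List.find?_cons]
      rw [PySem.Dict.get?_mk_cons]
      cases hbe : k1 == k
      · have hne' : (k == k1) = false := by
          cases hbe' : k == k1
          · rfl
          · have : k = k1 := by simpa using hbe'
            rw [this] at hbe
            simp at hbe
        simp only [Bool.false_eq_true, if_false]
        apply ih
        simp only [List.contains_cons, Bool.or_eq_false_iff]
        exact ⟨hne', hk⟩
      · simp

theorem find?_pvItems (store : List (String × String)) (k : String) :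
    ((pvItems store).find? (fun kv => kv.1 == k)).map (fun kv => kv.2)
      = (PySem.Dict.mk store).get? k :=
  find?_pvItemsGo store [] k rfl

-- A's or-chain over candidate keys, as a recursion (proof-side view of A's expression)
def pvChain (items : List (String × String)) : List String → String
  | [] => ""
  | k :: r => pvOr (((items.find? (fun kv => kv.1 == k)).map (fun kv => kv.2)).getD "") (pvChain items r)

-- min? with key fst, when the minimum-priority element is unique
theorem min?_eq_unique (l : List (Nat × String)) (m : Nat × String) (hm : m ∈ l)
    (hmin : ∀ p ∈ l, m.1 ≤ p.1) (huniq : ∀ p ∈ l, p.1 = m.1 → p = m) :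
    PySem.List.min? l (fun p => p.1) = some m := by
  cases hml : PySem.List.min? l (fun p => p.1) with
  | none =>
    rw [PySem.List.min?_eq_none_iff] at hml
    simp [hml] at hm
  | some m' =>
    have hmem := PySem.List.min?_mem hml
    have hle := PySem.List.min?_isMin hml m hm
    have hge := hmin m' hmem
    have : m'.1 = m.1 := Nat.le_antisymm hle hge
    rw [huniq m' hmem this]

-- membership in pvCands, unpacked
theorem mem_pvCands (items : List (String × String)) (ks : List String) (p : Nat × String) :
    p ∈ pvCands items ks ↔
      ∃ kv ∈ items, kv.2 ≠ "" ∧ PySem.List.index? ks kv.1 = some p.1 ∧ p.2 = kv.2 := by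
  simp only [pvCands, List.mem_filterMap]
  constructor
  · rintro ⟨kv, hkv, hf⟩
    by_cases h2 : kv.2 = ""
    · simp [h2] at hf
    · rw [if_pos h2] at hf
      rcases Option.map_eq_some_iff.mp hf with ⟨i, hi, hp⟩
      subst hp
      exact ⟨kv, hkv, h2, hi, rfl⟩
  · rintro ⟨kv, hkv, h2, hi, hv⟩
    refine ⟨kv, hkv, ?_⟩
    rw [if_pos h2, hi, ← hv]
    simp

-- idxOf? at the same index forces the same element
theorem idxOf?_inj (l : List String) : ∀ (a b : String) (i : Nat),
    l.idxOf? a = some i → l.idxOf? b = some i → a = b := by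
  induction l with
  | nil => intro a b i ha _; simp [List.idxOf?] at ha
  | cons x t ih =>
    intro a b i ha hb
    rw [List.idxOf?_cons] at ha hb
    by_cases hxa : (x == a) = true <;> by_cases hxb : (x == b) = true
    · have h1 : x = a := by simpa using hxa
      have h2 : x = b := by simpa using hxb
      rw [← h1, ← h2]
    · rw [if_pos hxa] at ha
      rw [if_neg hxb] at hb
      cases hbt : t.idxOf? b <;> rw [hbt] at hb
      · simp at hb
      · simp only [Option.some_inj] at ha
        simp only [Option.map_some, Option.some_inj] at hb
        omega
    · rw [if_neg hxa] at ha
      rw [if_pos hxb] at hb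
      cases hat : t.idxOf? a <;> rw [hat] at ha
      · simp at ha
      · simp only [Option.some_inj] at hb
        simp only [Option.map_some, Option.some_inj] at ha
        omega
    · rw [if_neg hxa] at ha
      rw [if_neg hxb] at hb
      cases hat : t.idxOf? a <;> rw [hat] at ha
      · simp at ha
      · cases hbt : t.idxOf? b <;> rw [hbt] at hb
        · simp at hb
        · simp only [Option.map_some, Option.some_inj] at ha hb
          rename_i j j'
          have hjj : j = j' := by omega
          exact ih a b j hat (by rw [hjj]; exact hbt)

-- two candidates with the same priority are the same candidate (keys distinct)
theorem pvCands_fst_inj (items : List (String × String)) (ks : List String)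
    (hnd : ((items.map (fun kv => kv.1)).Nodup)) :
    ∀ p ∈ pvCands items ks, ∀ q ∈ pvCands items ks, p.1 = q.1 → p = q := by
  intro p hp q hq hpq
  rcases (mem_pvCands _ _ _).mp hp with ⟨kv, hkv, _, hi, hv⟩
  rcases (mem_pvCands _ _ _).mp hq with ⟨kv', hkv', _, hi', hv'⟩
  rw [hpq] at hi
  have hkk : kv.1 = kv'.1 :=
    idxOf?_inj ks kv.1 kv'.1 q.1 (by simpa [PySem.List.index?] using hi)
      (by simpa [PySem.List.index?] using hi')
  have : kv = kv' := List.inj_on_of_nodup_map hnd hkv hkv' hkk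
  rw [this] at hv
  cases p; cases q; simp_all

-- key lemma: the min-priority candidate scan equals A's or-chain, for distinct keys
theorem best_eq_chain (ks : List String) (items : List (String × String))
    (hnd : ((items.map (fun kv => kv.1)).Nodup)) :
    (match PySem.List.min? (pvCands items ks) (fun p => p.1) with
      | some p => p.2
      | none => "")
      = pvChain items ks := by
  induction ks with
  | nil =>
    have : pvCands items [] = [] := by
      simp [pvCands, PySem.List.index?, List.idxOf?]
    simp [this, pvChain, PySem.List.min?]
  | cons k r ih =>
    by_cases hw : ((items.find? (fun kv => kv.1 == k)).map (fun kv => kv.2)).getD "" = ""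
    · -- no truthy entry for key k: every candidate comes from r, shifted by one
      have hno : ∀ kv ∈ items, kv.2 ≠ "" → ¬ (kv.1 == k) = true := by
        intro kv hkv h2 hbk
        cases hf : items.find? (fun kv => kv.1 == k) with
        | none => exact List.find?_eq_none.mp hf kv hkv hbk
        | some kv0 =>
          have hk0 : kv0.1 = k := by simpa using List.find?_some hf
          have hkk : kv.1 = k := by simpa using hbk
          have := List.inj_on_of_nodup_map hnd hkv (List.mem_of_find?_eq_some hf) (by rw [hk0, hkk])
          rw [this] at h2
          simp [hf] at hw
          exact h2 hw
      have hcs : pvCands items (k :: r) = (pvCands items r).map (fun p => (p.1 + 1, p.2)) := by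
        rw [pvCands, pvCands, List.map_filterMap]
        apply List.filterMap_congr
        intro kv hkv
        by_cases h2 : kv.2 = ""
        · simp [h2]
        · have hne := hno kv hkv h2
          have hne2 : ¬ (k == kv.1) = true := by
            intro hb
            have hbk : k = kv.1 := by simpa using hb
            exact hne (by simp [hbk])
          rw [if_pos h2, if_pos h2]
          simp only [PySem.List.index?, List.idxOf?_cons]
          rw [if_neg hne2]
          cases List.idxOf? kv.1 r <;> simp
      have h1 : pvChain items (k :: r) = pvChain items r := by
        simp [pvChain, pvOr, hw]
      cases hmr : PySem.List.min? (pvCands items r) (fun p => p.1) with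
      | none =>
        have hnil : pvCands items r = [] := (PySem.List.min?_eq_none_iff _ _).mp hmr
        rw [h1, ← ih, hmr, hcs, hnil]
        simp [PySem.List.min?]
      | some m =>
        have hmk : PySem.List.min? (pvCands items (k :: r)) (fun p => p.1)
            = some (m.1 + 1, m.2) := by
          rw [hcs]
          apply min?_eq_unique
          · exact List.mem_map.mpr ⟨m, PySem.List.min?_mem hmr, rfl⟩
          · intro p hp
            rcases List.mem_map.mp hp with ⟨q, hq, rfl⟩
            have := PySem.List.min?_isMin hmr q hq
            simpa using this
          · intro p hp hp1
            rcases List.mem_map.mp hp with ⟨q, hq, rfl⟩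
            have hq1 : q.1 = m.1 := by simpa using hp1
            have := pvCands_fst_inj items r hnd q hq m (PySem.List.min?_mem hmr) hq1
            rw [this]
        rw [hmk, h1, ← ih, hmr]
    · -- a truthy entry for key k exists: it is the unique priority-0 candidate, so min picks it
      cases hf : items.find? (fun kv => kv.1 == k) with
      | none => simp [hf] at hw
      | some kv0 =>
        have hk0 : kv0.1 = k := by simpa using List.find?_some hf
        have hmem0 : kv0 ∈ items := List.mem_of_find?_eq_some hf
        have h20 : kv0.2 ≠ "" := by simpa [hf] using hw
        have hin : ((0 : Nat), kv0.2) ∈ pvCands items (k :: r) := by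
          rw [mem_pvCands]
          refine ⟨kv0, hmem0, h20, ?_, rfl⟩
          rw [hk0]
          simp [PySem.List.index?, List.idxOf?_cons]
        have hm : PySem.List.min? (pvCands items (k :: r)) (fun p => p.1) = some (0, kv0.2) := by
          apply min?_eq_unique _ _ hin
          · intro p _; exact Nat.zero_le _
          · intro p hp hp0
            rcases (mem_pvCands _ _ _).mp hp with ⟨kv, hkv, h2, hi, hv⟩
            have hk : kv.1 = k := by
              simp only [PySem.List.index?, List.idxOf?_cons] at hi
              by_cases hb : (k == kv.1) = true
              · have : k = kv.1 := by simpa using hb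
                exact this.symm
              · rw [if_neg hb] at hi
                cases hix : List.idxOf? kv.1 r <;> rw [hix] at hi <;> simp_all
            have : kv = kv0 := List.inj_on_of_nodup_map hnd hkv hmem0 (by rw [hk, hk0])
            rw [this] at hv
            cases p; simp_all
        rw [hm]
        simp [pvChain, hf, pvOr, h20]

-- pvBest, rewritten as A's or-chain over the store's get?
theorem pvBest_eq (store : List (String × String)) (ks : List String) :
    pvBest store ks = pvChain (pvItems store) ks := by
  unfold pvBest
  exact best_eq_chain ks (pvItems store) (pvItems_nodup_keys store)

theorem pvChain_nil (items : List (String × String)) : pvChain items [] = "" := rfl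

theorem pvChain_cons (store : List (String × String)) (k : String) (r : List String) :
    pvChain (pvItems store) (k :: r) = pvOr (pvGetD store k) (pvChain (pvItems store) r) := by
  simp only [pvChain, find?_pvItems, pvGetD]

-- ===== VERDICT (by name: the statement is the Claim_ definition above) =====
set_option maxHeartbeats 1000000 in
theorem parse_seller_block_py_spec : Claim_equal_parse_seller_block_py := by
  intro store _
  unfold Spec_parse_seller_block_py parse_seller_block_py parse_seller_block_py_alt
  by_cases h : store = []
  · simp [h]
  · simp only [if_neg h]
    rw [foldl_put (pvFieldVal store (pvS (pvBest store pvIdKeys)))]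
    have hsid : pvS (pvOr (pvOr (pvOr (pvOr (pvOr (pvGetD store "storeNum") (pvGetD store "sellerId")) (pvGetD store "storeId")) (pvGetD store "shopId")) (pvGetD store "userId")) (pvGetD store "memberId"))
        = pvS (pvBest store pvIdKeys) := by
      simp [pvIdKeys, pvBest_eq, pvChain_cons, pvChain_nil, pvOr_empty_right, pvOr_assoc]
    rw [hsid]
    simp only [List.nil_append]
    refine congrArg (List.filter _) ?_
    simp only [pvFieldSpec, List.map_cons, List.map_nil]
    simp only [pvFieldVal]
    simp [pvBest_eq, pvChain_cons, pvChain_nil, pvOr_empty_right, pvOr_assoc, pvUrl_raw]
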